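-- pv_equiv track=rewrite | github.com/CoderCouple/context0-python-backend | app/reasoning/engine.py | _synthesize_direct_answer
-- ===== SOURCE A (Python) =====
-- from typing import Any, Dict, List, Optional, Set, Tuple
--
-- def _synthesize_direct_answer(question: str, memory_texts: List[str]) -> str:
--     """Synthesize a direct answer from memory texts"""
--     # Combine most relevant memories
--     combined_info = ". ".join(memory_texts[:3])
--
--     # Simple answer based on question keywords
--     question_lower = question.lower()
--
--     if any(word in question_lower for word in ["when", "born", "birth"]):
--         birth_info = [
--             text
--             for text in memory_texts
--             if any(word in text.lower() for word in ["born", "birth", "july", "28"])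
--         ]
--         if birth_info:
--             return f"Based on my memories: {birth_info[0]}"
--
--     if any(
--         word in question_lower
--         for word in ["education", "study", "school", "college", "university"]
--     ):
--         edu_info = [
--             text
--             for text in memory_texts
--             if any(
--                 word in text.lower()
--                 for word in ["university", "college", "study", "computer science"]
--             )
--         ]
--         if edu_info:
--             return f"Regarding my education: {'. '.join(edu_info[:2])}"
--
--     if any(word in question_lower for word in ["career", "work", "job"]):
--         career_info = [
--             text
--             for text in memory_texts
--             if any(
--                 word in text.lower()
--                 for word in ["amazon", "google", "engineer", "job", "work"]
--             )
--         ]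
--         if career_info:
--             return f"About my career: {'. '.join(career_info[:2])}"
--
--     if any(
--         word in question_lower
--         for word in ["family", "brother", "sister", "parents"]
--     ):
--         family_info = [
--             text
--             for text in memory_texts
--             if any(
--                 word in text.lower()
--                 for word in [
--                     "family",
--                     "brother",
--                     "sister",
--                     "parents",
--                     "emma",
--                     "michael",
--                     "susan",
--                 ]
--             )
--         ]
--         if family_info:
--             return f"Regarding my family: {'. '.join(family_info[:2])}"
--
--     # Default: return first relevant memory
--     return f"Based on my memories: {memory_texts[0]}"
-- ===== SOURCE B (Python) =====
-- def _bucket_step(buckets, t):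
--     """Classify one memory text into every category bucket it matches."""
--     tl = t.lower()
--     birth, edu, career, family = buckets
--     if any(k in tl for k in ("born", "birth", "july", "28")):
--         birth.append(t)
--     if any(k in tl for k in ("university", "college", "study", "computer science")):
--         edu.append(t)
--     if any(k in tl for k in ("amazon", "google", "engineer", "job", "work")):
--         career.append(t)
--     if any(k in tl for k in ("family", "brother", "sister", "parents",
--                              "emma", "michael", "susan")):
--         family.append(t)
--     return (birth, edu, career, family)
--
--
-- def _synthesize_direct_answer(question, memory_texts):
--     """Single pass: bucket each memory text into all four categories at once,
--     then pick the first triggered, non-empty category."""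
--     buckets = ([], [], [], [])
--     for t in memory_texts:
--         buckets = _bucket_step(buckets, t)
--     birth, edu, career, family = buckets
--     ql = question.lower()
--     if any(w in ql for w in ("when", "born", "birth")) and birth:
--         return "Based on my memories: " + birth[0]
--     if any(w in ql for w in ("education", "study", "school", "college", "university")) and edu:
--         return "Regarding my education: " + ". ".join(edu[:2])
--     if any(w in ql for w in ("career", "work", "job")) and career:
--         return "About my career: " + ". ".join(career[:2])
--     if any(w in ql for w in ("family", "brother", "sister", "parents")) and family:
--         return "Regarding my family: " + ". ".join(family[:2])
--     return "Based on my memories: " + memory_texts[0]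
-- ===== Notes on version B (the rewrite author's own statement) =====
-- stated objective: alternative
-- what changed: A makes a separate filtering pass over memory_texts (re-lowering every text) for each triggered category; B makes ONE pass over memory_texts via a _bucket_step helper that lowers each text once and appends it to all four category buckets it matches, then a separate selection phase returns the first triggered non-empty bucket.
import Mathlib
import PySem

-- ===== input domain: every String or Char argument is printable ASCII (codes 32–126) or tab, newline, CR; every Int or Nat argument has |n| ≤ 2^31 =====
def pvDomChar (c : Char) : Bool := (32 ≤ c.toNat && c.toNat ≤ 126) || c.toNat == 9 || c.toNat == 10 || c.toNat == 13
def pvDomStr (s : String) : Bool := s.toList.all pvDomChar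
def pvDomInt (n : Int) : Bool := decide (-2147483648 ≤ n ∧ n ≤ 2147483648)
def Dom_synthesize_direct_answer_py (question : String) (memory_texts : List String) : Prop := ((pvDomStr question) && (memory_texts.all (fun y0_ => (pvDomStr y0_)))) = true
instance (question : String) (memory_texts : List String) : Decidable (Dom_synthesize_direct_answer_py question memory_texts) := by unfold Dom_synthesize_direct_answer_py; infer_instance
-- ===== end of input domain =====

-- B replaces A's per-category staged filter passes by ONE pass over memory_texts that buckets each text into all four categories at once, then a selection phase; same return value.


-- ===== PORT A =====
-- (A also computes `combined_info = ". ".join(memory_texts[:3])` but never uses it; omitted as dead code.)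
-- The sequential `return` blocks are chained through `let` fallthroughs, last block first.
def synthesize_direct_answer_py (question : String) (memory_texts : List String) : String :=
  let question_lower := PySem.Str.lower question
  -- memory_texts[0]: Pre_ excludes the empty list, where Python raises IndexError
  let dflt := "Based on my memories: " ++ ((PySem.List.pyGet? memory_texts 0).getD "")
  let step4 :=
    if (["family", "brother", "sister", "parents"].any fun w => PySem.Str.isIn w question_lower) then
      let family_info := memory_texts.filter fun t =>
        ["family", "brother", "sister", "parents", "emma", "michael", "susan"].any fun w =>
          PySem.Str.isIn w (PySem.Str.lower t)
      if family_info ≠ [] then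
        "Regarding my family: " ++ PySem.Str.join ". " (PySem.List.slice family_info none (some 2))
      else dflt
    else dflt
  let step3 :=
    if (["career", "work", "job"].any fun w => PySem.Str.isIn w question_lower) then
      let career_info := memory_texts.filter fun t =>
        ["amazon", "google", "engineer", "job", "work"].any fun w =>
          PySem.Str.isIn w (PySem.Str.lower t)
      if career_info ≠ [] then
        "About my career: " ++ PySem.Str.join ". " (PySem.List.slice career_info none (some 2))
      else step4
    else step4
  let step2 :=
    if (["education", "study", "school", "college", "university"].any fun w => PySem.Str.isIn w question_lower) then
      let edu_info := memory_texts.filter fun t =>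
        ["university", "college", "study", "computer science"].any fun w =>
          PySem.Str.isIn w (PySem.Str.lower t)
      if edu_info ≠ [] then
        "Regarding my education: " ++ PySem.Str.join ". " (PySem.List.slice edu_info none (some 2))
      else step3
    else step3
  if (["when", "born", "birth"].any fun w => PySem.Str.isIn w question_lower) then
    let birth_info := memory_texts.filter fun t =>
      ["born", "birth", "july", "28"].any fun w =>
        PySem.Str.isIn w (PySem.Str.lower t)
    if birth_info ≠ [] then
      "Based on my memories: " ++ ((PySem.List.pyGet? birth_info 0).getD "")
    else step2
  else step2

-- ===== PORT B =====
-- any(k in tl for k in kws)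
def pvHit (kws : List String) (tl : String) : Bool :=
  kws.any fun k => PySem.Str.isIn k tl

-- _bucket_step: classify one memory text into every category bucket it matches
def pvStep (buckets : List String × List String × List String × List String) (t : String) :
    List String × List String × List String × List String :=
  let tl := PySem.Str.lower t
  let birth := if pvHit ["born", "birth", "july", "28"] tl then buckets.1 ++ [t] else buckets.1
  let edu := if pvHit ["university", "college", "study", "computer science"] tl then
      buckets.2.1 ++ [t] else buckets.2.1
  let career := if pvHit ["amazon", "google", "engineer", "job", "work"] tl then
      buckets.2.2.1 ++ [t] else buckets.2.2.1
  let family := if pvHit ["family", "brother", "sister", "parents", "emma", "michael", "susan"] tl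
      then buckets.2.2.2 ++ [t] else buckets.2.2.2
  (birth, edu, career, family)

def synthesize_direct_answer_py_alt (question : String) (memory_texts : List String) : String :=
  let b := memory_texts.foldl pvStep ([], [], [], [])
  let ql := PySem.Str.lower question
  if pvHit ["when", "born", "birth"] ql ∧ b.1 ≠ [] then
    "Based on my memories: " ++ ((PySem.List.pyGet? b.1 0).getD "")
  else if pvHit ["education", "study", "school", "college", "university"] ql ∧ b.2.1 ≠ [] then
    "Regarding my education: " ++ PySem.Str.join ". " (b.2.1.take 2)
  else if pvHit ["career", "work", "job"] ql ∧ b.2.2.1 ≠ [] then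
    "About my career: " ++ PySem.Str.join ". " (b.2.2.1.take 2)
  else if pvHit ["family", "brother", "sister", "parents"] ql ∧ b.2.2.2 ≠ [] then
    "Regarding my family: " ++ PySem.Str.join ". " (b.2.2.2.take 2)
  else
    "Based on my memories: " ++ ((PySem.List.pyGet? memory_texts 0).getD "")

-- ===== PRECONDITION & SPEC =====
-- Pre_ excludes only memory_texts = [], where A (and B) raise IndexError on memory_texts[0].
def Pre_synthesize_direct_answer_py (question : String) (memory_texts : List String) : Prop :=
  memory_texts ≠ []
instance (question : String) (memory_texts : List String) : Decidable (Pre_synthesize_direct_answer_py question memory_texts) := by unfold Pre_synthesize_direct_answer_py; infer_instance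
def pvWitness_synthesize_direct_answer_py : String × List String :=
  ("When was I born?", ["I was born in July"])

def Spec_synthesize_direct_answer_py (question : String) (memory_texts : List String) (out : String) : Prop := out = synthesize_direct_answer_py_alt question memory_texts
instance (question : String) (memory_texts : List String) (out : String) : Decidable (Spec_synthesize_direct_answer_py question memory_texts out) := by unfold Spec_synthesize_direct_answer_py; infer_instance

-- ===== CLAIM (what is proved, stated in full; the proofs are below) =====
def Claim_equal_synthesize_direct_answer_py : Prop := ∀ (question : String) (memory_texts : List String), Dom_synthesize_direct_answer_py question memory_texts → Pre_synthesize_direct_answer_py question memory_texts → Spec_synthesize_direct_answer_py question memory_texts (synthesize_direct_answer_py question memory_texts)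

-- ===== LEMMAS AND PROOFS =====

-- the single-pass fold computes exactly the four staged filters
theorem pvStep_foldl (l a b c d : List String) :
    l.foldl pvStep (a, b, c, d)
    = (a ++ l.filter (fun t => pvHit ["born", "birth", "july", "28"] (PySem.Str.lower t)),
       b ++ l.filter (fun t => pvHit ["university", "college", "study", "computer science"] (PySem.Str.lower t)),
       c ++ l.filter (fun t => pvHit ["amazon", "google", "engineer", "job", "work"] (PySem.Str.lower t)),
       d ++ l.filter (fun t => pvHit ["family", "brother", "sister", "parents", "emma", "michael", "susan"] (PySem.Str.lower t))) := by
  induction l generalizing a b c d with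
  | nil => simp
  | cons x xs ih =>
    simp only [List.foldl_cons, List.filter_cons]
    by_cases h1 : pvHit ["born", "birth", "july", "28"] (PySem.Str.lower x) <;>
      by_cases h2 : pvHit ["university", "college", "study", "computer science"] (PySem.Str.lower x) <;>
      by_cases h3 : pvHit ["amazon", "google", "engineer", "job", "work"] (PySem.Str.lower x) <;>
      by_cases h4 : pvHit ["family", "brother", "sister", "parents", "emma", "michael", "susan"] (PySem.Str.lower x) <;>
      simp [pvStep, h1, h2, h3, h4, ih]

-- '. '.join of a two-element prefix: A slices with [:2], B takes 2
theorem pv_slice_two (l : List String) :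
    PySem.List.slice l none (some 2) = l.take 2 := by
  simpa using PySem.List.slice_to l (b := 2) (by norm_num)

-- ===== VERDICT (by name: the statement is the Claim_ definition above) =====
set_option maxHeartbeats 16000000 in
theorem synthesize_direct_answer_py_spec : Claim_equal_synthesize_direct_answer_py := by
  intro question memory_texts _ _
  unfold Spec_synthesize_direct_answer_py synthesize_direct_answer_py
    synthesize_direct_answer_py_alt
  simp only [pvStep_foldl, List.nil_append, pv_slice_two, pvHit]
  split_ifs <;> simp_all
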